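-- pv_equiv track=rewrite | github.com/danishmustafa86/Advent-Of-Code-2024 | Day 14/pro2.py | find_alignment_time
-- ===== SOURCE A (Python) =====
-- from collections import defaultdict
--
-- GRID_WIDTH = 100
--
-- GRID_HEIGHT = 100
--
-- def simulate_robots(robots, seconds):
--     positions = defaultdict(int)
--
--     for (x, y), (vx, vy) in robots:
--         new_x = (x + vx * seconds) % GRID_WIDTH
--         new_y = (y + vy * seconds) % GRID_HEIGHT
--         positions[(new_x, new_y)] += 1
--
--     return positions
--
-- def find_alignment_time(robots, max_seconds=10000, threshold=20):
--     for t in range(max_seconds):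
--         positions = simulate_robots(robots, t)
--         x_coords = [x for x, _ in positions.keys()]
--         y_coords = [y for _, y in positions.keys()]
--
--         # Check if bounding box is small enough to indicate alignment
--         if x_coords and y_coords and max(x_coords) - min(x_coords) < threshold and max(y_coords) - min(y_coords) < threshold:
--             return t
--
--     return -1  # No alignment found within the time limit
-- ===== SOURCE B (Python) =====
-- GRID_WIDTH = 100
--
-- GRID_HEIGHT = 100
--
-- def find_alignment_time(robots, max_seconds=10000, threshold=20):
--     # Transposed (alternative) algorithm: positions repeat with period P = 100 (both grid sides
--     # are 100), so one pass over the ROBOTS (outer) incrementally stepping each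
--     # robot through the P time slots builds per-time extrema tables; the answer is
--     # then the first time slot below min(max_seconds, P) whose bounding box is small.
--     P = 100
--     minx = [P] * P
--     maxx = [-1] * P
--     miny = [P] * P
--     maxy = [-1] * P
--     for (x, y), (vx, vy) in robots:
--         x %= GRID_WIDTH
--         y %= GRID_HEIGHT
--         for t in range(P):
--             minx[t] = min(minx[t], x)
--             maxx[t] = max(maxx[t], x)
--             miny[t] = min(miny[t], y)
--             maxy[t] = max(maxy[t], y)
--             x = (x + vx) % GRID_WIDTH
--             y = (y + vy) % GRID_HEIGHT
--     if not robots: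
--         return -1
--     good = [t for t in range(min(max_seconds, P))
--             if maxx[t] - minx[t] < threshold and maxy[t] - miny[t] < threshold]
--     return good[0] if good else -1
-- ===== Notes on version B (the rewrite author's own statement) =====
-- stated objective: alternative
-- what changed: B transposes the loops: instead of scanning times 0..max_seconds and rebuilding a position-counter dict per time, it makes ONE pass over the robots, stepping each robot incrementally through the 100 time slots of the period (lcm of the 100x100 grid sides) to build per-time min/max coordinate tables, then picks the first time slot below min(max_seconds,100) whose bounding box is small; cost is bounded by the period instead of max_seconds, but B always pays the full 100*n table pass where A may exit at an early time.
import Mathlib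
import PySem

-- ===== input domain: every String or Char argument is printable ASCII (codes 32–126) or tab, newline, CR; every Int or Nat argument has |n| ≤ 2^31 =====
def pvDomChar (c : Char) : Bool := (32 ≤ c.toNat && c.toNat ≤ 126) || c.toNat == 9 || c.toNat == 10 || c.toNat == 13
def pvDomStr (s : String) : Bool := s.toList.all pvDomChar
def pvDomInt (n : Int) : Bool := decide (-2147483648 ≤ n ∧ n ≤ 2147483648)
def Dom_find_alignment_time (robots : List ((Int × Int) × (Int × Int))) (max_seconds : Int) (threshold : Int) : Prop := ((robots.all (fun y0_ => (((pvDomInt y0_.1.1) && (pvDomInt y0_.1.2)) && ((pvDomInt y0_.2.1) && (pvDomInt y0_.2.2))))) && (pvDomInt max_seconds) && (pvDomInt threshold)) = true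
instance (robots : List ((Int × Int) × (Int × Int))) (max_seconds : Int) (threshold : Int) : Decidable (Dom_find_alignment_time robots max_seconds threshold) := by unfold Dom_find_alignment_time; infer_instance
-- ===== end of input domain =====

-- B transposes the loops: one pass over the ROBOTS builds per-time-slot min/max coordinate
-- tables for the 100-step period (positions on the 100x100 grid repeat with period 100), then
-- the first small-bounding-box slot below min(max_seconds, 100) is returned (objective: alternative).

-- ===== PORT A =====
def GRID_WIDTH : Int := 100
def GRID_HEIGHT : Int := 100

-- positions = defaultdict(int); positions[(new_x, new_y)] += 1
def simulate_robots (robots : List ((Int × Int) × (Int × Int))) (seconds : Int) :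
    PySem.Dict (Int × Int) Int :=
  robots.foldl (fun d r =>
    let new_x := PySem.Int.mod (r.1.1 + r.2.1 * seconds) GRID_WIDTH
    let new_y := PySem.Int.mod (r.1.2 + r.2.2 * seconds) GRID_HEIGHT
    d.modify (new_x, new_y) 0 (· + 1)) PySem.Dict.empty

-- the body of A's loop: bounding-box test on the dict's keys (max/min never hit an empty list:
-- Python short-circuits on `x_coords and y_coords`)
def pvCheckA (robots : List ((Int × Int) × (Int × Int))) (threshold : Int) (t : Int) : Bool :=
  let positions := simulate_robots robots t
  let x_coords := positions.keys.map (·.1)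
  let y_coords := positions.keys.map (·.2)
  !x_coords.isEmpty && !y_coords.isEmpty &&
    (match PySem.List.max? x_coords (fun y => y), PySem.List.min? x_coords (fun y => y),
           PySem.List.max? y_coords (fun y => y), PySem.List.min? y_coords (fun y => y) with
     | some mxa, some mna, some mxb, some mnb =>
         decide (mxa - mna < threshold) && decide (mxb - mnb < threshold)
     | _, _, _, _ => false)

-- for t in range(max_seconds): … return t  /  return -1
def pvLoopA (robots : List ((Int × Int) × (Int × Int))) (threshold : Int) : List Int → Int
  | [] => -1
  | t :: ts => if pvCheckA robots threshold t then t else pvLoopA robots threshold ts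

def find_alignment_time (robots : List ((Int × Int) × (Int × Int))) (max_seconds : Int) (threshold : Int) : Int :=
  pvLoopA robots threshold (PySem.List.pyRange 0 max_seconds 1)

-- ===== PORT B =====
-- inner 'for t in range(P)' of Source B: walks the four tables (all of length 100) in step with t,
-- updating the extrema at slot t and stepping (x, y) by one second
def pvUpd (vx vy : Int) : Int → Int → List Int → List Int → List Int → List Int →
    (List Int × List Int × List Int × List Int)
  | x, y, a :: as, b :: bs, c :: cs, d :: ds =>
      let r := pvUpd vx vy (PySem.Int.mod (x + vx) GRID_WIDTH) (PySem.Int.mod (y + vy) GRID_HEIGHT) as bs cs ds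
      (min a x :: r.1, max b x :: r.2.1, min c y :: r.2.2.1, max d y :: r.2.2.2)
  | _, _, as, bs, cs, ds => (as, bs, cs, ds)

-- outer 'for (x, y), (vx, vy) in robots' of Source B (x %= GRID_WIDTH; y %= GRID_HEIGHT first)
def pvTables (robots : List ((Int × Int) × (Int × Int))) :
    List Int × List Int × List Int × List Int :=
  robots.foldl (fun tb r =>
    pvUpd r.2.1 r.2.2 (PySem.Int.mod r.1.1 GRID_WIDTH) (PySem.Int.mod r.1.2 GRID_HEIGHT)
      tb.1 tb.2.1 tb.2.2.1 tb.2.2.2)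
    (List.replicate 100 100, List.replicate 100 (-1), List.replicate 100 100, List.replicate 100 (-1))

-- table indices t below are always in range [0, 100), so the getD default 0 is never used
def find_alignment_time_alt (robots : List ((Int × Int) × (Int × Int))) (max_seconds : Int) (threshold : Int) : Int :=
  let tb := pvTables robots
  if robots.isEmpty then -1
  else
    ((PySem.List.pyRange 0 (min max_seconds 100) 1).filter (fun t =>
        decide (PySem.List.pyGetD tb.2.1 t 0 - PySem.List.pyGetD tb.1 t 0 < threshold) &&
        decide (PySem.List.pyGetD tb.2.2.2 t 0 - PySem.List.pyGetD tb.2.2.1 t 0 < threshold))).headD (-1)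

-- ===== PRECONDITION & SPEC =====
def Spec_find_alignment_time (robots : List ((Int × Int) × (Int × Int))) (max_seconds : Int) (threshold : Int) (out : Int) : Prop := out = find_alignment_time_alt robots max_seconds threshold
instance (robots : List ((Int × Int) × (Int × Int))) (max_seconds : Int) (threshold : Int) (out : Int) : Decidable (Spec_find_alignment_time robots max_seconds threshold out) := by unfold Spec_find_alignment_time; infer_instance

-- ===== CLAIM (what is proved, stated in full; the proofs are below) =====
def Claim_equal_find_alignment_time : Prop := ∀ (robots : List ((Int × Int) × (Int × Int))) (max_seconds : Int) (threshold : Int), Dom_find_alignment_time robots max_seconds threshold → Spec_find_alignment_time robots max_seconds threshold (find_alignment_time robots max_seconds threshold)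

-- ===== LEMMAS AND PROOFS =====

-- proof-side middle form: A's per-time check written over the raw coordinate lists
def pvCheckB (robots : List ((Int × Int) × (Int × Int))) (threshold : Int) (t : Int) : Bool :=
  let xs := robots.map (fun r => PySem.Int.mod (r.1.1 + r.2.1 * t) GRID_WIDTH)
  let ys := robots.map (fun r => PySem.Int.mod (r.1.2 + r.2.2 * t) GRID_HEIGHT)
  match PySem.List.max? xs (fun y => y), PySem.List.min? xs (fun y => y),
        PySem.List.max? ys (fun y => y), PySem.List.min? ys (fun y => y) with
  | some mxa, some mna, some mxb, some mnb =>
      decide (mxa - mna < threshold) && decide (mxb - mnb < threshold)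
  | _, _, _, _ => false

lemma pymodW (a : Int) : PySem.Int.mod a GRID_WIDTH = a % 100 := by
  unfold GRID_WIDTH; exact PySem.Int.mod_eq_emod_of_pos (by norm_num)

lemma pymodH (a : Int) : PySem.Int.mod a GRID_HEIGHT = a % 100 := by
  unfold GRID_HEIGHT; exact PySem.Int.mod_eq_emod_of_pos (by norm_num)

-- extrema depend only on the set of elements
lemma max?_congr_mem (l₁ l₂ : List Int) (h : ∀ x, x ∈ l₁ ↔ x ∈ l₂) :
    PySem.List.max? l₁ (fun y => y) = PySem.List.max? l₂ (fun y => y) := by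
  cases h₁ : PySem.List.max? l₁ (fun y => y) with
  | none =>
      have e1 : l₁ = [] := (PySem.List.max?_eq_none_iff _ _).mp h₁
      have e2 : l₂ = [] := by
        subst e1
        refine List.eq_nil_iff_forall_not_mem.mpr (fun x hx => ?_)
        exact (List.not_mem_nil (a := x)) ((h x).mpr hx)
      rw [e2, (PySem.List.max?_eq_none_iff _ _).mpr rfl]
  | some m₁ =>
      have hm₁ : m₁ ∈ l₁ := PySem.List.max?_mem h₁
      cases h₂ : PySem.List.max? l₂ (fun y => y) with
      | none =>
          have e2 : l₂ = [] := (PySem.List.max?_eq_none_iff _ _).mp h₂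
          subst e2
          exact absurd ((h m₁).mp hm₁) (List.not_mem_nil)
      | some m₂ =>
          have hm₂ : m₂ ∈ l₂ := PySem.List.max?_mem h₂
          have le₁ := PySem.List.max?_isMax h₂ m₁ ((h m₁).mp hm₁)
          have le₂ := PySem.List.max?_isMax h₁ m₂ ((h m₂).mpr hm₂)
          simpa using le_antisymm le₁ le₂

lemma min?_congr_mem (l₁ l₂ : List Int) (h : ∀ x, x ∈ l₁ ↔ x ∈ l₂) :
    PySem.List.min? l₁ (fun y => y) = PySem.List.min? l₂ (fun y => y) := by
  cases h₁ : PySem.List.min? l₁ (fun y => y) with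
  | none =>
      have e1 : l₁ = [] := (PySem.List.min?_eq_none_iff _ _).mp h₁
      have e2 : l₂ = [] := by
        subst e1
        refine List.eq_nil_iff_forall_not_mem.mpr (fun x hx => ?_)
        exact (List.not_mem_nil (a := x)) ((h x).mpr hx)
      rw [e2, (PySem.List.min?_eq_none_iff _ _).mpr rfl]
  | some m₁ =>
      have hm₁ : m₁ ∈ l₁ := PySem.List.min?_mem h₁
      cases h₂ : PySem.List.min? l₂ (fun y => y) with
      | none =>
          have e2 : l₂ = [] := (PySem.List.min?_eq_none_iff _ _).mp h₂
          subst e2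
          exact absurd ((h m₁).mp hm₁) (List.not_mem_nil)
      | some m₂ =>
          have hm₂ : m₂ ∈ l₂ := PySem.List.min?_mem h₂
          have le₁ := PySem.List.min?_isMin h₁ m₂ ((h m₂).mpr hm₂)
          have le₂ := PySem.List.min?_isMin h₂ m₁ ((h m₁).mp hm₁)
          simpa using le_antisymm le₁ le₂

-- A's check equals the raw-list check on every t
lemma sim_eq_counter (robots : List ((Int × Int) × (Int × Int))) (t : Int) :
    simulate_robots robots t = PySem.Dict.counter (robots.map (fun r =>
      (PySem.Int.mod (r.1.1 + r.2.1 * t) GRID_WIDTH, PySem.Int.mod (r.1.2 + r.2.2 * t) GRID_HEIGHT))) := by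
  rw [PySem.Dict.counter_eq_foldl, List.foldl_map]
  rfl

lemma check_eq (robots : List ((Int × Int) × (Int × Int))) (threshold t : Int) :
    pvCheckA robots threshold t = pvCheckB robots threshold t := by
  rcases List.eq_nil_or_concat robots with hr | ⟨rs, r, hr⟩
  · subst hr; rfl
  · have hne : robots ≠ [] := by subst hr; simp
    clear hr
    simp only [pvCheckA, pvCheckB, sim_eq_counter, PySem.Dict.keys_counter]
    set pl := robots.map (fun r =>
      (PySem.Int.mod (r.1.1 + r.2.1 * t) GRID_WIDTH, PySem.Int.mod (r.1.2 + r.2.2 * t) GRID_HEIGHT)) with hpl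
    have hxmem : ∀ x, x ∈ (PySem.Set.ofList pl).map (fun p => p.1) ↔
        x ∈ robots.map (fun r => PySem.Int.mod (r.1.1 + r.2.1 * t) GRID_WIDTH) := by
      intro x
      simp only [List.mem_map, PySem.Set.mem_ofList, hpl]
      constructor
      · rintro ⟨p, ⟨r, hrmem, rfl⟩, rfl⟩; exact ⟨r, hrmem, rfl⟩
      · rintro ⟨r, hrmem, rfl⟩; exact ⟨_, ⟨r, hrmem, rfl⟩, rfl⟩
    have hymem : ∀ x, x ∈ (PySem.Set.ofList pl).map (fun p => p.2) ↔
        x ∈ robots.map (fun r => PySem.Int.mod (r.1.2 + r.2.2 * t) GRID_HEIGHT) := by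
      intro x
      simp only [List.mem_map, PySem.Set.mem_ofList, hpl]
      constructor
      · rintro ⟨p, ⟨r, hrmem, rfl⟩, rfl⟩; exact ⟨r, hrmem, rfl⟩
      · rintro ⟨r, hrmem, rfl⟩; exact ⟨_, ⟨r, hrmem, rfl⟩, rfl⟩
    obtain ⟨r0, hr0⟩ := List.exists_mem_of_ne_nil robots hne
    have hxne : ((PySem.Set.ofList pl).map (fun p => p.1)) ≠ [] := by
      intro hnil
      have hmem : (PySem.Int.mod (r0.1.1 + r0.2.1 * t) GRID_WIDTH) ∈
          ((PySem.Set.ofList pl).map (fun p => p.1)) :=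
        (hxmem _).mpr (List.mem_map.mpr ⟨r0, hr0, rfl⟩)
      rw [hnil] at hmem
      exact List.not_mem_nil hmem
    have hyne : ((PySem.Set.ofList pl).map (fun p => p.2)) ≠ [] := by
      intro hnil
      have hmem : (PySem.Int.mod (r0.1.2 + r0.2.2 * t) GRID_HEIGHT) ∈
          ((PySem.Set.ofList pl).map (fun p => p.2)) :=
        (hymem _).mpr (List.mem_map.mpr ⟨r0, hr0, rfl⟩)
      rw [hnil] at hmem
      exact List.not_mem_nil hmem
    rw [max?_congr_mem _ _ hxmem, min?_congr_mem _ _ hxmem,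
        max?_congr_mem _ _ hymem, min?_congr_mem _ _ hymem]
    simp only [List.isEmpty_eq_false_iff.mpr hxne, List.isEmpty_eq_false_iff.mpr hyne,
      Bool.not_false, Bool.true_and]

-- periodicity of a single coordinate
lemma mod_shift (x v t : Int) : (x + v * t) % 100 = (x + v * (t % 100)) % 100 := by
  conv_lhs => rw [← Int.mul_ediv_add_emod t 100]
  have : x + v * (100 * (t / 100) + t % 100) = (x + v * (t % 100)) + 100 * (v * (t / 100)) := by
    ring
  rw [this, Int.add_mul_emod_self_left]

lemma checkB_period (robots : List ((Int × Int) × (Int × Int))) (threshold t : Int) :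
    pvCheckB robots threshold t = pvCheckB robots threshold (t % 100) := by
  simp only [pvCheckB]
  have e1 : (fun (r : (Int × Int) × (Int × Int)) => PySem.Int.mod (r.1.1 + r.2.1 * t) GRID_WIDTH) =
      (fun r => PySem.Int.mod (r.1.1 + r.2.1 * (t % 100)) GRID_WIDTH) := by
    funext r
    rw [pymodW, pymodW]
    exact mod_shift r.1.1 r.2.1 t
  have e2 : (fun (r : (Int × Int) × (Int × Int)) => PySem.Int.mod (r.1.2 + r.2.2 * t) GRID_HEIGHT) =
      (fun r => PySem.Int.mod (r.1.2 + r.2.2 * (t % 100)) GRID_HEIGHT) := by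
    funext r
    rw [pymodH, pymodH]
    exact mod_shift r.1.2 r.2.2 t
  rw [e1, e2]

-- A's loop is first-match: it returns the head of the filtered time list
lemma loopA_eq_filter (robots : List ((Int × Int) × (Int × Int))) (threshold : Int) (l : List Int) :
    pvLoopA robots threshold l = (l.filter (pvCheckA robots threshold)).headD (-1) := by
  induction l with
  | nil => rfl
  | cons t ts ih =>
      by_cases h : pvCheckA robots threshold t = true
      · simp [pvLoopA, h]
      · simp only [Bool.not_eq_true] at h
        simp [pvLoopA, h, ih]

-- characterization of the inner table walk of B
lemma pvUpd_eq (vx vy : Int) : ∀ (n : Nat) (x y : Int), x % 100 = x → y % 100 = y →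
    ∀ (g1 g2 g3 g4 : Nat → Int),
    pvUpd vx vy x y ((List.range n).map g1) ((List.range n).map g2)
        ((List.range n).map g3) ((List.range n).map g4) =
      ((List.range n).map (fun (i : Nat) => min (g1 i) ((x + vx * i) % 100)),
       (List.range n).map (fun (i : Nat) => max (g2 i) ((x + vx * i) % 100)),
       (List.range n).map (fun (i : Nat) => min (g3 i) ((y + vy * i) % 100)),
       (List.range n).map (fun (i : Nat) => max (g4 i) ((y + vy * i) % 100))) := by
  intro n
  induction n with
  | zero => intro x y _ _ g1 g2 g3 g4; simp [pvUpd]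
  | succ n ih =>
      intro x y hx hy g1 g2 g3 g4
      rw [List.range_succ_eq_map]
      simp only [List.map_cons, List.map_map, pvUpd, pymodW, pymodH]
      have hshift : ∀ (a k : Int), ((a % 100) + k) % 100 = (a + k) % 100 := by
        intro a k; omega
      rw [ih ((x + vx) % 100) ((y + vy) % 100) (by omega) (by omega)]
      have ef : ∀ (g : Nat → Int) (op : Int → Int → Int) (a v : Int),
          (List.range n).map (fun i => op ((g ∘ Nat.succ) i) (((a + v) % 100 + v * i) % 100)) =
          (List.range n).map ((fun i => op (g i) ((a + v * i) % 100)) ∘ Nat.succ) := by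
        intro g op a v
        apply List.map_congr_left
        intro i _
        simp only [Function.comp]
        congr 1
        rw [hshift (a + v) (v * i)]
        congr 1
        push_cast
        ring
      refine Prod.ext ?_ (Prod.ext ?_ (Prod.ext ?_ ?_)) <;> simp only
      · rw [ef g1 min x vx]
        congr 1
        simp [hx]
      · rw [ef g2 max x vx]
        congr 1
        simp [hx]
      · rw [ef g3 min y vy]
        congr 1
        simp [hy]
      · rw [ef g4 max y vy]
        congr 1
        simp [hy]

-- characterization of B's whole table-building pass
lemma tables_foldl : ∀ (robots : List ((Int × Int) × (Int × Int))) (g1 g2 g3 g4 : Nat → Int),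
    robots.foldl (fun tb r =>
      pvUpd r.2.1 r.2.2 (PySem.Int.mod r.1.1 GRID_WIDTH) (PySem.Int.mod r.1.2 GRID_HEIGHT)
        tb.1 tb.2.1 tb.2.2.1 tb.2.2.2)
      ((List.range 100).map g1, (List.range 100).map g2, (List.range 100).map g3, (List.range 100).map g4) =
    ((List.range 100).map (fun (i : Nat) => robots.foldl (fun m r => min m ((r.1.1 + r.2.1 * (i : Int)) % 100)) (g1 i)),
     (List.range 100).map (fun (i : Nat) => robots.foldl (fun m r => max m ((r.1.1 + r.2.1 * (i : Int)) % 100)) (g2 i)),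
     (List.range 100).map (fun (i : Nat) => robots.foldl (fun m r => min m ((r.1.2 + r.2.2 * (i : Int)) % 100)) (g3 i)),
     (List.range 100).map (fun (i : Nat) => robots.foldl (fun m r => max m ((r.1.2 + r.2.2 * (i : Int)) % 100)) (g4 i))) := by
  intro robots
  induction robots with
  | nil => intro g1 g2 g3 g4; rfl
  | cons r rs ih =>
      intro g1 g2 g3 g4
      rw [List.foldl_cons]
      have hred : ∀ (a k : Int), ((a % 100) + k) % 100 = (a + k) % 100 := by intro a k; omega
      have hstep : pvUpd r.2.1 r.2.2 (PySem.Int.mod r.1.1 GRID_WIDTH) (PySem.Int.mod r.1.2 GRID_HEIGHT)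
          ((List.range 100).map g1) ((List.range 100).map g2) ((List.range 100).map g3) ((List.range 100).map g4) =
          ((List.range 100).map (fun (i : Nat) => min (g1 i) ((r.1.1 + r.2.1 * (i : Int)) % 100)),
           (List.range 100).map (fun (i : Nat) => max (g2 i) ((r.1.1 + r.2.1 * (i : Int)) % 100)),
           (List.range 100).map (fun (i : Nat) => min (g3 i) ((r.1.2 + r.2.2 * (i : Int)) % 100)),
           (List.range 100).map (fun (i : Nat) => max (g4 i) ((r.1.2 + r.2.2 * (i : Int)) % 100))) := by
        rw [pymodW, pymodH,
          pvUpd_eq r.2.1 r.2.2 100 (r.1.1 % 100) (r.1.2 % 100) (by omega) (by omega)]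
        refine Prod.ext ?_ (Prod.ext ?_ (Prod.ext ?_ ?_)) <;> simp only <;>
          (apply List.map_congr_left; intro i _; rw [hred])
      rw [hstep, ih]
      refine Prod.ext ?_ (Prod.ext ?_ (Prod.ext ?_ ?_)) <;> simp only <;>
        (apply List.map_congr_left; intro i _; rw [List.foldl_cons])

-- fold of min/max with an out-of-range seed over a nonempty bounded list
lemma foldl_min_sharp (x0 : Int) (t : List Int) (h : ∀ z ∈ x0 :: t, z < 100) :
    List.foldl min 100 (x0 :: t) = t.foldl min x0 := by
  have hmem : t.foldl min x0 ∈ x0 :: t :=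
    PySem.List.min?_mem (PySem.List.min?_id_cons x0 t)
  have hlt := h _ hmem
  calc List.foldl min 100 (x0 :: t) = t.foldl min (min 100 x0) := rfl
    _ = min 100 (t.foldl min x0) := List.foldl_assoc
    _ = t.foldl min x0 := min_eq_right (by omega)

lemma foldl_max_sharp (x0 : Int) (t : List Int) (h : ∀ z ∈ x0 :: t, 0 ≤ z) :
    List.foldl max (-1) (x0 :: t) = t.foldl max x0 := by
  have hmem : t.foldl max x0 ∈ x0 :: t :=
    PySem.List.max?_mem (PySem.List.max?_id_cons x0 t)
  have hle := h _ hmem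
  calc List.foldl max (-1) (x0 :: t) = t.foldl max (max (-1) x0) := rfl
    _ = max (-1) (t.foldl max x0) := List.foldl_assoc
    _ = t.foldl max x0 := max_eq_right (by omega)

-- B's filter predicate agrees with the raw-list check on in-period times (robots nonempty)
lemma predB_eq_checkB (r0 : (Int × Int) × (Int × Int)) (rs : List ((Int × Int) × (Int × Int)))
    (threshold t : Int) (ht0 : 0 ≤ t) (ht : t < 100) :
    (decide (PySem.List.pyGetD (pvTables (r0 :: rs)).2.1 t 0 -
             PySem.List.pyGetD (pvTables (r0 :: rs)).1 t 0 < threshold) &&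
     decide (PySem.List.pyGetD (pvTables (r0 :: rs)).2.2.2 t 0 -
             PySem.List.pyGetD (pvTables (r0 :: rs)).2.2.1 t 0 < threshold)) =
    pvCheckB (r0 :: rs) threshold t := by
  have ht' : (t.toNat : Int) = t := Int.toNat_of_nonneg ht0
  have hrep : ∀ c : Int, List.replicate 100 c = (List.range 100).map (fun _ => c) := by
    intro c
    rw [List.map_const', List.length_range]
  have htb : pvTables (r0 :: rs) =
      ((List.range 100).map (fun (i : Nat) =>
         (r0 :: rs).foldl (fun m r => min m ((r.1.1 + r.2.1 * (i : Int)) % 100)) 100),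
       (List.range 100).map (fun (i : Nat) =>
         (r0 :: rs).foldl (fun m r => max m ((r.1.1 + r.2.1 * (i : Int)) % 100)) (-1)),
       (List.range 100).map (fun (i : Nat) =>
         (r0 :: rs).foldl (fun m r => min m ((r.1.2 + r.2.2 * (i : Int)) % 100)) 100),
       (List.range 100).map (fun (i : Nat) =>
         (r0 :: rs).foldl (fun m r => max m ((r.1.2 + r.2.2 * (i : Int)) % 100)) (-1))) := by
    unfold pvTables
    simp only [hrep]
    exact tables_foldl (r0 :: rs) _ _ _ _
  have hget : ∀ (f : Nat → Int), PySem.List.pyGetD ((List.range 100).map f) t 0 = f t.toNat := by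
    intro f
    rw [PySem.List.pyGetD_eq_getElem _ 0 ht0 (by simp; omega)]
    simp
  rw [htb]
  simp only [hget]
  simp only [pvCheckB, pymodW, pymodH, List.map_cons,
    PySem.List.max?_id_cons, PySem.List.min?_id_cons]
  have hfold_min : ∀ (f : ((Int × Int) × (Int × Int)) → Int), (∀ r, f r < 100) →
      (r0 :: rs).foldl (fun m r => min m (f r)) 100 = (rs.map f).foldl min (f r0) := by
    intro f hb
    have h1 : (r0 :: rs).foldl (fun m r => min m (f r)) 100 =
        List.foldl min 100 ((r0 :: rs).map f) := (List.foldl_map (f := f) (g := min)).symm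
    rw [h1, List.map_cons]
    exact foldl_min_sharp (f r0) (rs.map f) (by
      intro z hz
      rcases List.mem_cons.mp hz with h | h
      · subst h; exact hb r0
      · rcases List.mem_map.mp h with ⟨r, _, rfl⟩; exact hb r)
  have hfold_max : ∀ (f : ((Int × Int) × (Int × Int)) → Int), (∀ r, 0 ≤ f r) →
      (r0 :: rs).foldl (fun m r => max m (f r)) (-1) = (rs.map f).foldl max (f r0) := by
    intro f hb
    have h1 : (r0 :: rs).foldl (fun m r => max m (f r)) (-1) =
        List.foldl max (-1) ((r0 :: rs).map f) := (List.foldl_map (f := f) (g := max)).symm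
    rw [h1, List.map_cons]
    exact foldl_max_sharp (f r0) (rs.map f) (by
      intro z hz
      rcases List.mem_cons.mp hz with h | h
      · subst h; exact hb r0
      · rcases List.mem_map.mp h with ⟨r, _, rfl⟩; exact hb r)
  rw [ht']
  rw [hfold_min (fun r => (r.1.1 + r.2.1 * t) % 100) (fun r => Int.emod_lt_of_pos _ (by norm_num)),
      hfold_max (fun r => (r.1.1 + r.2.1 * t) % 100) (fun r => Int.emod_nonneg _ (by norm_num)),
      hfold_min (fun r => (r.1.2 + r.2.2 * t) % 100) (fun r => Int.emod_lt_of_pos _ (by norm_num)),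
      hfold_max (fun r => (r.1.2 + r.2.2 * t) % 100) (fun r => Int.emod_nonneg _ (by norm_num))]

-- first match below M equals first match below min(M, 100), by periodicity
lemma filter_cap (robots : List ((Int × Int) × (Int × Int))) (threshold M : Int) :
    ((PySem.List.pyRange 0 M 1).filter (pvCheckB robots threshold)).headD (-1) =
    ((PySem.List.pyRange 0 (min M 100) 1).filter (pvCheckB robots threshold)).headD (-1) := by
  by_cases hM : M ≤ 100
  · rw [min_eq_left hM]
  · rw [min_eq_right (by omega)]
    rw [PySem.List.pyRange_one_append 0 100 M (by norm_num) (by omega), List.filter_append]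
    cases hf : (PySem.List.pyRange 0 100 1).filter (pvCheckB robots threshold) with
    | cons a l => simp
    | nil =>
        have hfalse : ∀ t ∈ PySem.List.pyRange 0 100 1, pvCheckB robots threshold t = false := by
          intro t htm
          by_contra hc
          have : t ∈ (PySem.List.pyRange 0 100 1).filter (pvCheckB robots threshold) :=
            List.mem_filter.mpr ⟨htm, by simpa using hc⟩
          rw [hf] at this
          exact List.not_mem_nil this
        have h2 : (PySem.List.pyRange 100 M 1).filter (pvCheckB robots threshold) = [] := by
          rw [List.filter_eq_nil_iff]
          intro t htm
          rw [checkB_period]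
          have hmem : t % 100 ∈ PySem.List.pyRange 0 100 1 := by
            rw [PySem.List.mem_pyRange_one]
            exact ⟨Int.emod_nonneg t (by norm_num), Int.emod_lt_of_pos t (by norm_num)⟩
          simp [hfalse _ hmem]
        simp [h2]

-- ===== VERDICT (by name: the statement is the Claim_ definition above) =====
theorem find_alignment_time_spec : Claim_equal_find_alignment_time := by
  intro robots M threshold _
  unfold Spec_find_alignment_time find_alignment_time find_alignment_time_alt
  rw [loopA_eq_filter]
  have hAB : pvCheckA robots threshold = pvCheckB robots threshold := by
    funext t; exact check_eq robots threshold t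
  rw [hAB, filter_cap]
  cases robots with
  | nil =>
      simp only [List.isEmpty_nil, if_pos]
      have : ∀ t ∈ PySem.List.pyRange 0 (min M 100) 1, pvCheckB [] threshold t = false := by
        intro t _; rfl
      rw [List.filter_eq_nil_iff.mpr (by intro t htm; simp [this t htm])]
      rfl
  | cons r0 rs =>
      simp only [List.isEmpty_cons, Bool.false_eq_true]
      congr 1
      apply List.filter_congr
      intro t htm
      rw [PySem.List.mem_pyRange_one] at htm
      exact (predB_eq_checkB r0 rs threshold t htm.1 (by omega)).symm
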